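-- pv_equiv track=rewrite | github.com/Jeremy-Smith5/CEP-public | Python/x.get.sql.cols.py | mkvert
-- ===== SOURCE A (Python) =====
-- def mkvert(nms):
-- 	'''
-- 	nms=[]
-- 	for n in varlist:
-- 		nms.append(n[:n.find(' ')])
-- 	'''
-- 	'''
-- 	lens=[]
-- 	for l in varlist:
-- 		lens.append(l[l.find(' ')+1:])
-- 	'''
-- 	nms = [n + ' ' for n in nms]
-- 	#print (nms)
-- 	#print ('---' * 5)
-- 	vHeader = []
-- 	ml = max([len(n) for n in nms])
-- 	for r in range(ml):
-- 		line=['' for n in nms]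
-- 		nnum = 0
-- 		for n in nms:
-- 			if len(n) >= (ml - r): line[nnum]=n[len(n) - ml + r]
-- 			nnum += 1
--
-- 		vHeader.append(line)
-- 	#vHeader.append(lens)
-- 	return vHeader
-- ===== SOURCE B (Python) =====
-- def mkvert(nms):
--     nms = [n + ' ' for n in nms]
--     ml = max(len(n) for n in nms)
--     padded = [[''] * (ml - len(n)) + list(n) for n in nms]
--     return [list(row) for row in zip(*padded)]
-- ===== Notes on version B (the rewrite author's own statement) =====
-- stated objective: simpler
-- what changed: Instead of nested loops that compute a right-aligned source index per cell, B left-pads each name (as a column of ''-cells plus its characters) to the common height and transposes the columns with zip(*...).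
-- outside the precondition, e.g. on mkvert([]): A raises ValueError, B raises ValueError
import Mathlib
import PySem

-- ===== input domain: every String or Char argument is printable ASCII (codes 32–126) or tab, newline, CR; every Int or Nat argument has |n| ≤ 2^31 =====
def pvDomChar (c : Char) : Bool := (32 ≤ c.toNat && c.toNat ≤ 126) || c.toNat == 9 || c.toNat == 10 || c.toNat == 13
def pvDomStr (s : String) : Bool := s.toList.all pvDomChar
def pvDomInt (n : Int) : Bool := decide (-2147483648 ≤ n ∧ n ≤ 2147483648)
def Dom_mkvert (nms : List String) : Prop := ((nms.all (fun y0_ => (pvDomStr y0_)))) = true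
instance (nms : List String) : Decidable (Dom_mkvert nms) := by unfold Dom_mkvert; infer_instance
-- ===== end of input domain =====

-- B replaces A's per-cell right-aligned index arithmetic by left-padding each name to the
-- common height and transposing the columns (objective: simpler).

-- ===== PORT A =====
def mkvert (nms0 : List String) : List (List String) :=
  let nms := nms0.map (fun n => n.toList ++ [' '])            -- n + ' '
  match PySem.List.max? (nms.map (fun n => PySem.List.len n)) (fun x => x) with
  | none => []                                                -- max([]) raises ValueError; excluded by Pre_
  | some ml =>
    (PySem.List.pyRange 0 ml 1).map (fun r =>
      -- line = ['' for n in nms]; then line[nnum] is set (in order) where the guard holds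
      nms.map (fun n =>
        if ml - r ≤ PySem.List.len n then
          match PySem.List.pyGet? n (PySem.List.len n - ml + r) with
          | some c => String.ofList [c]
          | none => ""                                        -- unreachable under the guard
        else ""))

-- ===== PORT B =====
-- zip(*cols): emit the heads while every column is nonempty (exact Python zip semantics)
def zipStar : List (List String) → List (List String)
  | [] => []
  | c :: rest =>
    if h : (c :: rest).all (fun x => !x.isEmpty) then
      (c :: rest).map (fun x => x.headD "") :: zipStar ((c :: rest).map (fun x => x.drop 1))
    else []
termination_by cols => (cols.headD []).length
decreasing_by
  simp only [List.all_cons, Bool.and_eq_true] at h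
  have hcne : c ≠ [] := by simpa using h.1
  simp only [List.map_cons, List.headD_cons, List.length_drop]
  have := List.length_pos_iff.mpr hcne
  omega

def mkvert_alt (nms0 : List String) : List (List String) :=
  let nms := nms0.map (fun n => n.toList ++ [' '])            -- n + ' '
  match PySem.List.max? (nms.map (fun n => PySem.List.len n)) (fun x => x) with
  | none => []                                                -- max on empty raises; excluded by Pre_
  | some ml =>
    let padded := nms.map (fun n =>
      List.replicate (ml - PySem.List.len n).toNat "" ++ n.map (fun c => String.ofList [c]))
    zipStar padded

-- ===== PRECONDITION & SPEC =====
-- Pre_ excludes only the empty list, on which A (and B) raise ValueError from max([]).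
def Pre_mkvert (nms : List String) : Prop := nms ≠ []
instance (nms : List String) : Decidable (Pre_mkvert nms) := by unfold Pre_mkvert; infer_instance
def pvWitness_mkvert : List String := (["ab", "c"])
def Spec_mkvert (nms : List String) (out : List (List String)) : Prop := out = mkvert_alt nms
instance (nms : List String) (out : List (List String)) : Decidable (Spec_mkvert nms out) := by unfold Spec_mkvert; infer_instance

-- ===== CLAIM (what is proved, stated in full; the proofs are below) =====
def Claim_equal_mkvert : Prop := ∀ (nms : List String), Dom_mkvert nms → Pre_mkvert nms → Spec_mkvert nms (mkvert nms)

-- ===== LEMMAS AND PROOFS =====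

-- zipStar of a nonempty family of equal-length columns is the row-indexed grid
theorem zipStar_eq_grid (m : Nat) : ∀ cols : List (List String), cols ≠ [] →
    (∀ c ∈ cols, c.length = m) →
    zipStar cols = (List.range m).map (fun r => cols.map (fun c => c.getD r "")) := by
  induction m with
  | zero =>
    intro cols hne hlen
    obtain ⟨c, rest, rfl⟩ := List.exists_cons_of_ne_nil hne
    have hc : c = [] := List.length_eq_zero_iff.mp (hlen c (by simp))
    rw [zipStar]
    simp [hc]
  | succ m ih =>
    intro cols hne hlen
    obtain ⟨c, rest, rfl⟩ := List.exists_cons_of_ne_nil hne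
    have hall : (c :: rest).all (fun x => !x.isEmpty) = true := by
      simp only [List.all_eq_true]
      intro x hx
      have := hlen x hx
      simp [← List.length_eq_zero_iff, this]
    rw [zipStar, dif_pos hall]
    rw [ih ((c :: rest).map (fun x => x.drop 1)) (by simp)
      (by intro d hd
          simp only [List.mem_map] at hd
          obtain ⟨x, hx, rfl⟩ := hd
          have := hlen x hx
          simp [this])]
    rw [List.range_succ_eq_map]
    simp [Function.comp_def, List.getD_eq_getElem?_getD, List.head?_eq_getElem?]

theorem mkvert_spec : Claim_equal_mkvert := by
  intro nms0 _ hpre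
  unfold Spec_mkvert mkvert mkvert_alt
  simp only []
  set nms := nms0.map (fun n => n.toList ++ [' ']) with hnms
  have hnmsne : nms ≠ [] := by simpa [hnms] using hpre
  cases hmax : PySem.List.max? (nms.map (fun n => PySem.List.len n)) (fun x => x) with
  | none => rfl
  | some ml =>
    -- ml bounds
    have hmlmem : ml ∈ nms.map (fun n => PySem.List.len n) := PySem.List.max?_mem hmax
    have hmlub : ∀ y ∈ nms.map (fun n => PySem.List.len n), y ≤ ml := by
      intro y hy
      simpa using PySem.List.max?_isMax hmax y hy
    have hlen_le : ∀ n ∈ nms, (n.length : Int) ≤ ml := by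
      intro n hn
      have := hmlub (PySem.List.len n) (List.mem_map_of_mem hn)
      simpa using this
    have hml1 : 1 ≤ ml := by
      simp only [List.mem_map] at hmlmem
      obtain ⟨n, hn, rfl⟩ := hmlmem
      obtain ⟨s, -, rfl⟩ := List.mem_map.mp hn
      have h2 : PySem.List.len (s.toList ++ [' ']) = ((s.toList.length + 1 : Nat) : Int) := by
        simp
      rw [h2]; omega
    have hml0 : (0:Int) ≤ ml := le_trans (by norm_num) hml1
    dsimp only
    -- B side: zipStar of the padded columns is the grid
    rw [zipStar_eq_grid ml.toNat _ (by simpa [hnms] using hpre)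
      (by intro c hc
          simp only [List.mem_map] at hc
          obtain ⟨n, hn, rfl⟩ := hc
          have h1 := hlen_le n hn
          simp [PySem.List.len] at h1 ⊢
          omega)]
    -- A side: pyRange to List.range
    rw [PySem.List.pyRange_one]
    simp only [Int.sub_zero, zero_add, List.map_map, Function.comp_def]
    apply List.map_congr_left
    intro r hr
    have hrlt : r < ml.toNat := List.mem_range.mp hr
    apply List.map_congr_left
    intro n hn
    have hle := hlen_le n hn
    have hlen : PySem.List.len n = (n.length : Int) := by simp
    by_cases hcase : (ml - n.length : Int) ≤ r
    · -- character cell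
      have hidx0 : (0:Int) ≤ PySem.List.len n - ml + r := by rw [hlen]; omega
      have hlt : (PySem.List.len n - ml + r).toNat < n.length := by rw [hlen]; omega
      rw [if_pos (by rw [hlen]; omega)]
      rw [PySem.List.pyGet?_of_nonneg n hidx0, List.getElem?_eq_getElem hlt]
      rw [List.getD_eq_getElem?_getD,
          List.getElem?_append_right (by simp; omega)]
      simp only [List.length_replicate, List.getElem?_map]
      have hj : r - (ml - PySem.List.len n).toNat = (PySem.List.len n - ml + r).toNat := by
        rw [hlen]; omega
      rw [hj, List.getElem?_eq_getElem hlt]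
      simp
    · -- padding cell
      rw [if_neg (by rw [hlen]; omega)]
      rw [List.getD_eq_getElem?_getD,
          List.getElem?_append_left (by simp; omega),
          List.getElem?_eq_getElem (by simp; omega)]
      simp
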